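-- pv_equiv track=rewrite | github.com/ZarazaM/SkipJack | skipjackclass.py | convert_input_text
-- ===== SOURCE A (Python) =====
-- def convert_input_text(user_input):
--     """
--     convert source text into 64-bit integer blocks
--     :param user_input: source text
--     :return: list with 64-bit integer blocks
--     """
--
--     word_list = [ord(symbol) for symbol in user_input]
--
--     if len(word_list) % 4 != 0:
--         for i in range(4 - (len(word_list) % 4)):
--             word_list.append(0)
--
--     result_list = []
--     for word in range(len(word_list) // 4):
--         p1 = word_list[0 + word * 4] << 16 * 3
--         p2 = word_list[1 + word * 4] << 16 * 2
--         p3 = word_list[2 + word * 4] << 16 * 1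
--         p4 = word_list[3 + word * 4]
--
--         result_list.append(p1 | p2 | p3 | p4)
--
--     return result_list
-- ===== SOURCE B (Python) =====
-- def convert_input_text(user_input):
--     """
--     convert source text into 64-bit integer blocks
--     :param user_input: source text
--     :return: list with 64-bit integer blocks
--     """
--     result = []
--     acc = 0
--     cnt = 0
--     for ch in user_input:
--         acc = (acc << 16) | ord(ch)
--         cnt += 1
--         if cnt == 4:
--             result.append(acc)
--             acc = 0
--             cnt = 0
--     if cnt:
--         result.append(acc << (16 * (4 - cnt)))
--     return result
-- ===== Notes on version B (the rewrite author's own statement) =====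
-- stated objective: simpler
-- what changed: Single pass with a running accumulator and char counter (shift-or each char, flush every 4, left-justify a partial tail) instead of building an ord list, a separate zero-padding loop, and a block-indexing loop.
import Mathlib
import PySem

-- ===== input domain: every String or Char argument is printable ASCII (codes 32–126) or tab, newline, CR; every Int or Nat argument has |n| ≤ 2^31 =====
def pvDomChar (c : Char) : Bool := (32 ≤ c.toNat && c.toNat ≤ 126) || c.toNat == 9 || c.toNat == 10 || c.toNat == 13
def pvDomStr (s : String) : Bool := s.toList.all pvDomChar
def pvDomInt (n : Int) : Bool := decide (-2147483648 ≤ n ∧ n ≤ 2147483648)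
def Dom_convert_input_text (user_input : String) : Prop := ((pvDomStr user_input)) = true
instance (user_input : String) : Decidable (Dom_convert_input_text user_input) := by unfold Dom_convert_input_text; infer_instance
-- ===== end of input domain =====

-- B replaces A's ord-list + zero-padding loop + block-indexing loop by a single pass with a
-- running accumulator and a char counter (objective: simpler; same return value).

-- ===== PORT A =====
-- Python's ord(symbol)
def pvOrd (c : Char) : Int := (c.toNat : Int)

-- literal port of A; word_list[...] is ported as pyGetD (the loop only ever indexes in range,
-- where pyGetD agrees exactly with Python's word_list[i])
def convert_input_text (user_input : String) : List Int :=
  let word_list := user_input.toList.map pvOrd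
  let word_list :=
    if PySem.Int.mod (word_list.length : Int) 4 ≠ 0 then
      (PySem.List.pyRange 0 (4 - PySem.Int.mod (word_list.length : Int) 4) 1).foldl
        (fun acc _ => acc ++ [(0 : Int)]) word_list
    else word_list
  (PySem.List.pyRange 0 (PySem.Int.floordiv (word_list.length : Int) 4) 1).foldl
    (fun result_list word =>
      let p1 := PySem.List.pyGetD word_list (0 + word * 4) 0 <<< (16 * 3 : Nat)
      let p2 := PySem.List.pyGetD word_list (1 + word * 4) 0 <<< (16 * 2 : Nat)
      let p3 := PySem.List.pyGetD word_list (2 + word * 4) 0 <<< (16 * 1 : Nat)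
      let p4 := PySem.List.pyGetD word_list (3 + word * 4) 0
      result_list ++ [PySem.Int.bor (PySem.Int.bor (PySem.Int.bor p1 p2) p3) p4]) []

-- ===== PORT B =====
-- literal port of Source B: one pass over the characters with state (result, acc, cnt)
def convert_input_text_alt (user_input : String) : List Int :=
  let st := user_input.toList.foldl
    (fun (st : List Int × Int × Nat) ch =>
      let acc := PySem.Int.bor (st.2.1 <<< (16 : Nat)) (pvOrd ch)
      let cnt := st.2.2 + 1
      if cnt = 4 then (st.1 ++ [acc], 0, 0) else (st.1, acc, cnt))
    ([], 0, 0)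
  if st.2.2 ≠ 0 then st.1 ++ [st.2.1 <<< (16 * (4 - st.2.2) : Nat)] else st.1

-- ===== PRECONDITION & SPEC =====
def Spec_convert_input_text (user_input : String) (out : List Int) : Prop := out = convert_input_text_alt user_input
instance (user_input : String) (out : List Int) : Decidable (Spec_convert_input_text user_input out) := by unfold Spec_convert_input_text; infer_instance

-- ===== CLAIM (what is proved, stated in full; the proofs are below) =====
def Claim_equal_convert_input_text : Prop := ∀ (user_input : String), Dom_convert_input_text user_input → Spec_convert_input_text user_input (convert_input_text user_input)

-- ===== LEMMAS AND PROOFS =====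

-- proof-only helpers: the number of padding zeros A appends, A's block shape, B's step,
-- B's loop body / flush, and the chunked forms each loop computes
def padOf (n : Nat) : Nat := if n % 4 = 0 then 0 else 4 - n % 4

def blockA (a b c d : Int) : Int :=
  PySem.Int.bor (PySem.Int.bor (PySem.Int.bor (a <<< (48 : Nat)) (b <<< (32 : Nat))) (c <<< (16 : Nat))) d

def stepB (acc x : Int) : Int := PySem.Int.bor (acc <<< (16 : Nat)) x

def bstep (st : List Int × Int × Nat) (x : Int) : List Int × Int × Nat :=
  let acc := PySem.Int.bor (st.2.1 <<< (16 : Nat)) x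
  let cnt := st.2.2 + 1
  if cnt = 4 then (st.1 ++ [acc], 0, 0) else (st.1, acc, cnt)

def bflush (st : List Int × Int × Nat) : List Int :=
  if st.2.2 ≠ 0 then st.1 ++ [st.2.1 <<< (16 * (4 - st.2.2) : Nat)] else st.1

def chunkA : List Int → List Int
  | a :: b :: c :: d :: rest => blockA a b c d :: chunkA rest
  | _ => []

def chunkB : List Int → List Int
  | a :: b :: c :: d :: rest => stepB (stepB (stepB (stepB 0 a) b) c) d :: chunkB rest
  | [] => []
  | [a] => [stepB 0 a <<< (48 : Nat)]
  | [a, b] => [stepB (stepB 0 a) b <<< (32 : Nat)]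
  | [a, b, c] => [stepB (stepB (stepB 0 a) b) c <<< (16 : Nat)]

lemma int_shift_cast (m k : Nat) : ((m : Int) <<< k) = ((m <<< k : Nat) : Int) := rfl

lemma int_zero_cast : (0 : Int) = ((0 : Nat) : Int) := rfl

-- the bitwise identities relating A's block to B's accumulator (on Nat-cast inputs)
lemma blk4 (a b c d : Nat) :
    blockA (a : Int) (b : Int) (c : Int) (d : Int)
      = stepB (stepB (stepB (stepB 0 (a : Int)) (b : Int)) (c : Int)) (d : Int) := by
  simp only [blockA, stepB, int_zero_cast, int_shift_cast, PySem.Int.bor_natCast, Nat.cast_inj]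
  simp [Nat.shiftLeft_or_distrib, ← Nat.shiftLeft_add]

lemma blk1 (a : Nat) : blockA (a : Int) 0 0 0 = stepB 0 (a : Int) <<< (48 : Nat) := by
  simp only [blockA, stepB, int_zero_cast, int_shift_cast, PySem.Int.bor_natCast, Nat.cast_inj]
  simp

lemma blk2 (a b : Nat) : blockA (a : Int) (b : Int) 0 0 = stepB (stepB 0 (a : Int)) (b : Int) <<< (32 : Nat) := by
  simp only [blockA, stepB, int_zero_cast, int_shift_cast, PySem.Int.bor_natCast, Nat.cast_inj]
  simp [Nat.shiftLeft_or_distrib, ← Nat.shiftLeft_add]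

lemma blk3 (a b c : Nat) : blockA (a : Int) (b : Int) (c : Int) 0 = stepB (stepB (stepB 0 (a : Int)) (b : Int)) (c : Int) <<< (16 : Nat) := by
  simp only [blockA, stepB, int_zero_cast, int_shift_cast, PySem.Int.bor_natCast, Nat.cast_inj]
  simp [Nat.shiftLeft_or_distrib, ← Nat.shiftLeft_add]

-- B's loop computes chunkB
theorem B_loop : ∀ (l res : List Int), bflush (l.foldl bstep (res, 0, 0)) = res ++ chunkB l
  | [], res => by simp [bflush, chunkB]
  | [a], res => by simp [bflush, bstep, chunkB, stepB]
  | [a, b], res => by simp [bflush, bstep, chunkB, stepB]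
  | [a, b, c], res => by simp [bflush, bstep, chunkB, stepB]
  | a :: b :: c :: d :: rest, res => by
      have h := B_loop rest (res ++ [stepB (stepB (stepB (stepB 0 a) b) c) d])
      simp only [List.foldl_cons]
      rw [show bstep (bstep (bstep (bstep (res, 0, 0) a) b) c) d
            = (res ++ [stepB (stepB (stepB (stepB 0 a) b) c) d], 0, 0) from by simp [bstep, stepB]]
      rw [show (chunkB (a :: b :: c :: d :: rest)) = stepB (stepB (stepB (stepB 0 a) b) c) d :: chunkB rest from rfl]
      rw [h]
      simp

lemma getD4 (a b c d : Int) (rest : List Int) (n : Nat) :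
    (a :: b :: c :: d :: rest).getD (n + 4) 0 = rest.getD n 0 := by
  rw [show n + 4 = n + 1 + 1 + 1 + 1 from by omega]
  simp

-- A's indexing loop (in Nat-index getD form) computes chunkA
theorem A_chunks : ∀ (k : Nat) (pre : List Int), pre.length = 4 * k →
    (List.range k).map (fun j =>
      blockA (pre.getD (4 * j) 0) (pre.getD (4 * j + 1) 0) (pre.getD (4 * j + 2) 0) (pre.getD (4 * j + 3) 0))
      = chunkA pre := by
  intro k
  induction k with
  | zero =>
      intro pre h
      have hz : pre = [] := List.eq_nil_of_length_eq_zero (by omega)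
      subst hz; rfl
  | succ k ih =>
      intro pre h
      match pre, h with
      | a :: b :: c :: d :: rest, h =>
        have hrest : rest.length = 4 * k := by simp at h; omega
        rw [List.range_succ_eq_map, List.map_cons, List.map_map,
          show chunkA (a :: b :: c :: d :: rest) = blockA a b c d :: chunkA rest from rfl,
          ← ih rest hrest]
        refine List.cons_eq_cons.mpr ⟨by norm_num [List.getD], ?_⟩
        refine List.map_congr_left (fun j hj => ?_)
        simp only [Function.comp_apply, Nat.succ_eq_add_one]
        rw [show 4 * (j + 1) = 4 * j + 4 from by omega,
          show 4 * j + 4 + 1 = 4 * j + 1 + 4 from by omega,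
          show 4 * j + 4 + 2 = 4 * j + 2 + 4 from by omega,
          show 4 * j + 4 + 3 = 4 * j + 3 + 4 from by omega,
          getD4, getD4, getD4, getD4]

-- A's padding loop appends zeros
lemma foldZero : ∀ (l : List Int) (init : List Int),
    l.foldl (fun acc _ => acc ++ [(0 : Int)]) init = init ++ List.replicate l.length 0
  | [], init => by simp
  | x :: l, init => by
      rw [List.foldl_cons, foldZero l (init ++ [0])]
      simp [List.replicate_succ]

-- A's main loop, exactly as it appears in the port, evaluated to chunkA
lemma A_loop_eval (padded : List Int) (k : Nat) (hk : padded.length = 4 * k) :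
    (PySem.List.pyRange 0 (PySem.Int.floordiv (padded.length : Int) 4) 1).foldl
      (fun result_list word =>
        let p1 := PySem.List.pyGetD padded (0 + word * 4) 0 <<< (16 * 3 : Nat)
        let p2 := PySem.List.pyGetD padded (1 + word * 4) 0 <<< (16 * 2 : Nat)
        let p3 := PySem.List.pyGetD padded (2 + word * 4) 0 <<< (16 * 1 : Nat)
        let p4 := PySem.List.pyGetD padded (3 + word * 4) 0
        result_list ++ [PySem.Int.bor (PySem.Int.bor (PySem.Int.bor p1 p2) p3) p4]) []
      = chunkA padded := by
  have hdiv : PySem.Int.floordiv (padded.length : Int) 4 = ((k : Nat) : Int) := by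
    have := PySem.Int.floordiv_natCast padded.length 4
    rw [show ((4:Nat):Int) = (4:Int) from rfl] at this
    rw [this, hk]; norm_num [Nat.mul_div_cancel_left]
  rw [hdiv]
  have h1 := PySem.List.foldl_append_singleton_eq_map
    (f := fun (word : Int) =>
      PySem.Int.bor (PySem.Int.bor (PySem.Int.bor
        (PySem.List.pyGetD padded (0 + word * 4) 0 <<< (16 * 3 : Nat))
        (PySem.List.pyGetD padded (1 + word * 4) 0 <<< (16 * 2 : Nat)))
        (PySem.List.pyGetD padded (2 + word * 4) 0 <<< (16 * 1 : Nat)))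
        (PySem.List.pyGetD padded (3 + word * 4) 0))
    (l := PySem.List.pyRange 0 ((k : Nat) : Int) 1) (acc := ([] : List Int))
  rw [show (PySem.List.pyRange 0 ((k:Nat):Int) 1).foldl
        (fun result_list word =>
          let p1 := PySem.List.pyGetD padded (0 + word * 4) 0 <<< (16 * 3 : Nat)
          let p2 := PySem.List.pyGetD padded (1 + word * 4) 0 <<< (16 * 2 : Nat)
          let p3 := PySem.List.pyGetD padded (2 + word * 4) 0 <<< (16 * 1 : Nat)
          let p4 := PySem.List.pyGetD padded (3 + word * 4) 0
          result_list ++ [PySem.Int.bor (PySem.Int.bor (PySem.Int.bor p1 p2) p3) p4]) []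
      = [] ++ (PySem.List.pyRange 0 ((k:Nat):Int) 1).map (fun word =>
          PySem.Int.bor (PySem.Int.bor (PySem.Int.bor
            (PySem.List.pyGetD padded (0 + word * 4) 0 <<< (16 * 3 : Nat))
            (PySem.List.pyGetD padded (1 + word * 4) 0 <<< (16 * 2 : Nat)))
            (PySem.List.pyGetD padded (2 + word * 4) 0 <<< (16 * 1 : Nat)))
            (PySem.List.pyGetD padded (3 + word * 4) 0)) from h1]
  rw [List.nil_append, PySem.List.pyRange_zero_natCast, List.map_map]
  rw [← A_chunks k padded hk]
  refine List.map_congr_left (fun j hj => ?_)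
  simp only [Function.comp_apply]
  have e0 : (0 + (j : Int) * 4) = ((4 * j : Nat) : Int) := by push_cast; ring
  have e1 : (1 + (j : Int) * 4) = ((4 * j + 1 : Nat) : Int) := by push_cast; ring
  have e2 : (2 + (j : Int) * 4) = ((4 * j + 2 : Nat) : Int) := by push_cast; ring
  have e3 : (3 + (j : Int) * 4) = ((4 * j + 3 : Nat) : Int) := by push_cast; ring
  rw [e0, e1, e2, e3, PySem.List.pyGetD_natCast, PySem.List.pyGetD_natCast,
      PySem.List.pyGetD_natCast, PySem.List.pyGetD_natCast]
  rfl

-- port A evaluated: ords, padding, then chunked blocks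
theorem A_eq_chunkA (s : String) :
    convert_input_text s = chunkA (s.toList.map pvOrd ++ List.replicate (padOf s.toList.length) 0) := by
  unfold convert_input_text
  simp only []
  have hlen : (s.toList.map pvOrd).length = s.toList.length := by simp
  have hmod : PySem.Int.mod ((s.toList.map pvOrd).length : Int) 4
      = (((s.toList.map pvOrd).length % 4 : Nat) : Int) := by
    exact_mod_cast PySem.Int.mod_natCast (s.toList.map pvOrd).length 4
  by_cases hc : (s.toList.map pvOrd).length % 4 = 0
  · rw [if_neg (show ¬(PySem.Int.mod (((s.toList.map pvOrd).length : Nat) : Int) 4 ≠ 0) from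
      fun h => h (by rw [hmod, hc]; rfl))]
    have hc2 : s.toList.length % 4 = 0 := hlen ▸ hc
    have hp : padOf s.toList.length = 0 := by unfold padOf; rw [if_pos hc2]
    rw [hp, List.replicate_zero, List.append_nil]
    exact A_loop_eval _ ((s.toList.map pvOrd).length / 4) (by omega)
  · have hc2 : ¬ s.toList.length % 4 = 0 := hlen ▸ hc
    rw [if_pos (show PySem.Int.mod (((s.toList.map pvOrd).length : Nat) : Int) 4 ≠ 0 from
      by rw [hmod]; exact fun h => hc (by exact_mod_cast h))]
    rw [hmod, foldZero]
    have hlen2 : (PySem.List.pyRange 0 (4 - (((s.toList.map pvOrd).length % 4 : Nat) : Int)) 1).length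
        = padOf s.toList.length := by
      rw [PySem.List.length_pyRange_one]
      unfold padOf
      rw [if_neg hc2, hlen]
      omega
    rw [hlen2]
    refine A_loop_eval _ (((s.toList.map pvOrd) ++ List.replicate (padOf s.toList.length) (0:Int)).length / 4) ?_
    rw [List.length_append, List.length_replicate, hlen]
    unfold padOf
    rw [if_neg hc2]
    omega

-- A's chunked padded list equals B's chunked unpadded list
theorem main_lemma : ∀ (cs : List Char),
    chunkA (cs.map pvOrd ++ List.replicate (padOf cs.length) 0) = chunkB (cs.map pvOrd)
  | [] => rfl
  | [c1] => by
      show [blockA (pvOrd c1) 0 0 0] = [stepB 0 (pvOrd c1) <<< (48 : Nat)]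
      rw [show pvOrd c1 = ((c1.toNat : Nat) : Int) from rfl, blk1]
  | [c1, c2] => by
      show [blockA (pvOrd c1) (pvOrd c2) 0 0] = [stepB (stepB 0 (pvOrd c1)) (pvOrd c2) <<< (32 : Nat)]
      rw [show pvOrd c1 = ((c1.toNat : Nat) : Int) from rfl,
          show pvOrd c2 = ((c2.toNat : Nat) : Int) from rfl, blk2]
  | [c1, c2, c3] => by
      show [blockA (pvOrd c1) (pvOrd c2) (pvOrd c3) 0]
        = [stepB (stepB (stepB 0 (pvOrd c1)) (pvOrd c2)) (pvOrd c3) <<< (16 : Nat)]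
      rw [show pvOrd c1 = ((c1.toNat : Nat) : Int) from rfl,
          show pvOrd c2 = ((c2.toNat : Nat) : Int) from rfl,
          show pvOrd c3 = ((c3.toNat : Nat) : Int) from rfl, blk3]
  | c1 :: c2 :: c3 :: c4 :: rest => by
      have ih := main_lemma rest
      have hp : padOf (c1 :: c2 :: c3 :: c4 :: rest).length = padOf rest.length := by
        unfold padOf
        rw [show (c1 :: c2 :: c3 :: c4 :: rest).length = rest.length + 4 from by
              simp only [List.length_cons],
            Nat.add_mod_right]
      rw [List.map_cons, List.map_cons, List.map_cons, List.map_cons, hp]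
      show blockA (pvOrd c1) (pvOrd c2) (pvOrd c3) (pvOrd c4)
            :: chunkA (rest.map pvOrd ++ List.replicate (padOf rest.length) 0)
          = stepB (stepB (stepB (stepB 0 (pvOrd c1)) (pvOrd c2)) (pvOrd c3)) (pvOrd c4)
            :: chunkB (rest.map pvOrd)
      rw [ih]
      exact congrArg (fun x => x :: chunkB (List.map pvOrd rest))
        (blk4 c1.toNat c2.toNat c3.toNat c4.toNat)

-- ===== VERDICT (by name: the statement is the Claim_ definition above) =====
theorem convert_input_text_spec : Claim_equal_convert_input_text := by
  intro s _hd
  unfold Spec_convert_input_text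
  rw [A_eq_chunkA, main_lemma]
  unfold convert_input_text_alt
  rw [show (fun (st : List Int × Int × Nat) ch =>
        let acc := PySem.Int.bor (st.2.1 <<< (16 : Nat)) (pvOrd ch)
        let cnt := st.2.2 + 1
        if cnt = 4 then (st.1 ++ [acc], 0, 0) else (st.1, acc, cnt)) = (fun st ch => bstep st (pvOrd ch)) from rfl]
  rw [← List.foldl_map]
  exact (B_loop (s.toList.map pvOrd) []).symm
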